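-- pv_equiv track=rewrite | github.com/andig91/mini_projects | plane-full-text-search/plane_issue_search.py | find_word_index
-- ===== SOURCE A (Python) =====
-- from typing import Dict, Iterable, List, Optional, Tuple, DefaultDict
--
-- def find_word_index(word_spans: List[Tuple[int, int]], pos: int) -> Optional[int]:
--     """Gibt den Index des Wortes zurück, das die Zeichenposition `pos` enthält."""
--     lo, hi = 0, len(word_spans) - 1
--     while lo <= hi:
--         mid = (lo + hi) // 2
--         start, end = word_spans[mid]
--         if start <= pos < end:
--             return mid
--         if pos < start:
--             hi = mid - 1
--         else:
--             lo = mid + 1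
--     return None
-- ===== SOURCE B (Python) =====
-- from typing import List, Optional, Tuple
--
-- def find_word_index(word_spans: List[Tuple[int, int]], pos: int) -> Optional[int]:
--     """Binary search by recursing on list slices with an offset (no lo/hi indices)."""
--     def go(spans: List[Tuple[int, int]], offset: int) -> Optional[int]:
--         if not spans:
--             return None
--         mid = (len(spans) - 1) // 2
--         start, end = spans[mid]
--         if pos < start:
--             return go(spans[:mid], offset)
--         if pos < end:
--             return offset + mid
--         return go(spans[mid + 1:], offset + mid + 1)
--     return go(word_spans, 0)
-- ===== Notes on version B (the rewrite author's own statement) =====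
-- stated objective: alternative
-- what changed: A's iterative binary search over mutable lo/hi index bounds is replaced by a recursion on list slices carrying an offset: the helper splits the current slice at mid=(len-1)//2 and recurses on spans[:mid] or spans[mid+1:], which probes exactly the same elements since lo+(hi-lo)//2=(lo+hi)//2.
import Mathlib
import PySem

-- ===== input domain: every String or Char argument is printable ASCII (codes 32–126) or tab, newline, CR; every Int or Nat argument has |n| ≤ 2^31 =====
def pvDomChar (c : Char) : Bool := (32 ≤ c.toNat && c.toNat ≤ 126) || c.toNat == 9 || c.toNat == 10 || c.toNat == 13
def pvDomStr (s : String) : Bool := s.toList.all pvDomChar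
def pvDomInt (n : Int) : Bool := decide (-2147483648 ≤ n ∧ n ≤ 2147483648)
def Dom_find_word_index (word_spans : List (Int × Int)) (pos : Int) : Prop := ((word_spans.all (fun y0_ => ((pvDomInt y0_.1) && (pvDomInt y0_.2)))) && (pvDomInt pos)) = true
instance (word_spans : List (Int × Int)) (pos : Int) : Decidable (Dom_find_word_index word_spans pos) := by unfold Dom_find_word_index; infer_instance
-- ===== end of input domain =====

-- B replaces A's iterative lo/hi-index binary search by a recursion on list slices with an
-- offset; same elements probed, same result (objective: alternative).

-- ===== PORT A =====
-- the while-loop of A: state (lo, hi), branches in A's order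
def fwiLoopA (word_spans : List (Int × Int)) (pos lo hi : Int) : Option Int :=
  if _h : lo ≤ hi then
    let mid := PySem.Int.floordiv (lo + hi) 2
    match PySem.List.pyGet? word_spans mid with
    | none => none  -- unreachable: mid stays within the initial [0, len-1] range
    | some (start, «end») =>
      if start ≤ pos ∧ pos < «end» then some mid
      else if pos < start then fwiLoopA word_spans pos lo (mid - 1)
      else fwiLoopA word_spans pos (mid + 1) hi
  else none
termination_by (hi + 1 - lo).toNat
decreasing_by
  · have := PySem.Int.floordiv_two_mid_bounds (lo := lo) (hi := hi) _h
    omega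
  · have := PySem.Int.floordiv_two_mid_bounds (lo := lo) (hi := hi) _h
    omega

def find_word_index (word_spans : List (Int × Int)) (pos : Int) : Option Int :=
  fwiLoopA word_spans pos 0 ((word_spans.length : Int) - 1)

-- ===== PORT B =====
-- B's recursive helper go(spans, offset): splits the current slice at mid = (len-1)//2
def fwiGoB (pos : Int) (spans : List (Int × Int)) (offset : Int) : Option Int :=
  if _h : spans.isEmpty = true then none
  else
    let mid := PySem.Int.floordiv ((spans.length : Int) - 1) 2
    match PySem.List.pyGet? spans mid with
    | none => none  -- unreachable: 0 ≤ mid < len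
    | some (start, «end») =>
      if pos < start then fwiGoB pos (PySem.List.slice spans none (some mid)) offset
      else if pos < «end» then some (offset + mid)
      else fwiGoB pos (PySem.List.slice spans (some (mid + 1)) none) (offset + mid + 1)
termination_by spans.length
decreasing_by
  · have hne : spans ≠ [] := by simpa using _h
    have hlen : 1 ≤ (spans.length : Int) := by
      have := List.length_pos_iff.mpr hne; omega
    have hb := PySem.Int.floordiv_two_mid_bounds (lo := 0) (hi := (spans.length : Int) - 1)
      (by omega)
    simp only [zero_add] at hb
    rw [PySem.List.slice_to spans (by omega)]
    simp only [List.length_take]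
    omega
  · have hne : spans ≠ [] := by simpa using _h
    have hlen : 1 ≤ (spans.length : Int) := by
      have := List.length_pos_iff.mpr hne; omega
    have hb := PySem.Int.floordiv_two_mid_bounds (lo := 0) (hi := (spans.length : Int) - 1)
      (by omega)
    simp only [zero_add] at hb
    rw [PySem.List.slice_from spans (by omega)]
    simp only [List.length_drop]
    omega

def find_word_index_alt (word_spans : List (Int × Int)) (pos : Int) : Option Int :=
  fwiGoB pos word_spans 0

-- ===== PRECONDITION & SPEC =====
def Spec_find_word_index (word_spans : List (Int × Int)) (pos : Int) (out : Option Int) : Prop := out = find_word_index_alt word_spans pos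
instance (word_spans : List (Int × Int)) (pos : Int) (out : Option Int) : Decidable (Spec_find_word_index word_spans pos out) := by unfold Spec_find_word_index; infer_instance

-- ===== CLAIM (what is proved, stated in full; the proofs are below) =====
def Claim_equal_find_word_index : Prop := ∀ (word_spans : List (Int × Int)) (pos : Int), Dom_find_word_index word_spans pos → Spec_find_word_index word_spans pos (find_word_index word_spans pos)

-- ===== LEMMAS AND PROOFS =====

-- `spans` is the segment of `ws` starting at `offset`:
-- then B's go on (spans, offset) equals A's loop on ws over [offset, offset + |spans| - 1].
theorem fwiGoB_eq_fwiLoopA (ws : List (Int × Int)) (pos : Int) :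
    ∀ (n : Nat) (spans : List (Int × Int)), spans.length ≤ n →
      ∀ (offset : Nat),
        (∀ i : Nat, i < spans.length → PySem.List.pyGet? ws ((offset : Int) + i) = spans[i]?) →
        fwiGoB pos spans offset = fwiLoopA ws pos offset ((offset : Int) + spans.length - 1) := by
  intro n
  induction n with
  | zero =>
    intro spans hle offset _
    have hnil : spans = [] := List.length_eq_zero_iff.mp (Nat.le_zero.mp hle)
    subst hnil
    rw [fwiGoB, fwiLoopA]
    norm_num
  | succ n ih =>
    intro spans hle offset hseg
    by_cases hnil : spans = []
    · subst hnil
      rw [fwiGoB, fwiLoopA]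
      norm_num
    · have hlen1 : 1 ≤ spans.length := List.length_pos_iff.mpr hnil
      -- local midpoint m and its bounds
      set L : Int := (spans.length : Int) with hL
      have hLpos : 1 ≤ L := by simp [hL]; omega
      have hm := (PySem.Int.floordiv_eq_iff_of_pos (a := L - 1) (b := 2)
        (q := PySem.Int.floordiv (L - 1) 2) (by norm_num)).mp rfl
      set m : Int := PySem.Int.floordiv (L - 1) 2 with hmdef
      have hm0 : 0 ≤ m := by omega
      have hmlt : m < L := by omega
      -- the global midpoint of A equals offset + m
      have hmidA : PySem.Int.floordiv ((offset : Int) + ((offset : Int) + L - 1)) 2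
          = (offset : Int) + m := by
        rw [PySem.Int.floordiv_eq_iff_of_pos (by norm_num)]
        omega
      have hmNat : m = ((m.toNat : Nat) : Int) := by omega
      have hmNatLt : m.toNat < spans.length := by omega
      -- unfold one step of each
      rw [fwiGoB, fwiLoopA]
      rw [dif_neg (by simpa using hnil), dif_pos (by omega : (offset : Int) ≤ (offset : Int) + L - 1)]
      simp only [← hL, hmidA, ← hmdef]
      -- both probe the same element
      have hget : PySem.List.pyGet? ws ((offset : Int) + m) = spans[m.toNat]? := by
        rw [hmNat]; exact hseg m.toNat hmNatLt
      have hgetS : PySem.List.pyGet? spans m = spans[m.toNat]? := by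
        rw [PySem.List.pyGet?_of_nonneg spans hm0]
      rw [hget, hgetS, List.getElem?_eq_getElem hmNatLt]
      obtain ⟨s, e⟩ := spans[m.toNat]
      dsimp only
      by_cases h1 : pos < s
      · rw [if_pos h1, if_neg (by omega : ¬ (s ≤ pos ∧ pos < e)), if_pos h1]
        -- left half: spans[:m] at the same offset
        rw [PySem.List.slice_to spans hm0]
        have hlt : (spans.take m.toNat).length = m.toNat := by
          simp [List.length_take]; omega
        have := ih (spans.take m.toNat) (by omega) offset (by
          intro i hi
          rw [hlt] at hi
          rw [List.getElem?_take_of_lt (by omega)]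
          exact hseg i (by omega))
        rw [this, hlt]
        congr 1
        omega
      · by_cases h2 : pos < e
        · rw [if_neg h1, if_pos h2, if_pos (by omega : s ≤ pos ∧ pos < e)]
        · rw [if_neg h1, if_neg h2, if_neg (by omega : ¬ (s ≤ pos ∧ pos < e)),
            if_neg (by omega : ¬ pos < s)]
          -- right half: spans[m+1:] shifted by m+1
          rw [PySem.List.slice_from spans (by omega)]
          have htn : (m + 1).toNat = m.toNat + 1 := by omega
          have hld : (spans.drop (m + 1).toNat).length = spans.length - (m.toNat + 1) := by
            simp [htn]
          have := ih (spans.drop (m + 1).toNat) (by omega) (offset + m.toNat + 1) (by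
            intro i hi
            rw [hld] at hi
            rw [htn, List.getElem?_drop]
            have : ((offset + m.toNat + 1 : Nat) : Int) + i
                = (offset : Int) + ((m.toNat + 1 + i : Nat) : Int) := by push_cast; omega
            rw [this]
            exact hseg (m.toNat + 1 + i) (by omega))
          have he1 : ((offset + m.toNat + 1 : Nat) : Int) = (offset : Int) + m + 1 := by
            push_cast; omega
          have he2 : (offset : Int) + m + 1
              + ((spans.drop (m + 1).toNat).length : Int) - 1 = (offset : Int) + L - 1 := by
            rw [hld]; omega
          rw [he1, he2] at this
          exact this

-- ===== VERDICT (by name: the statement is the Claim_ definition above) =====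
theorem find_word_index_spec : Claim_equal_find_word_index := by
  intro ws pos _
  unfold Spec_find_word_index find_word_index find_word_index_alt
  have := fwiGoB_eq_fwiLoopA ws pos ws.length ws le_rfl 0 (by
    intro i hi
    simp)
  simpa using this.symm
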